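-- pv_equiv track=rewrite | github.com/talo/rush-py | protocols/mutation.py | aligned_index
-- ===== SOURCE A (Python) =====
-- def aligned_index(seq_a, i_u):
--     """
--     inputs
--     --------
--     seq_a: the aligned sequence (with dashes)
--     i_u:   the index into the unaligned sequence
--
--     outputs:
--     ----
--     aligned indices and the amino acid at the index, respectively
--     """
--     seq_u = seq_a.replace("-", "")
--     walk_a = 0
--     walk_u = 0
--     while walk_u != i_u or seq_a[walk_a] != seq_u[i_u]:
--         if seq_a[walk_a] == "-":
--             walk_a += 1
--         elif seq_a[walk_a] == seq_u[walk_u]: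
--             walk_a += 1
--             walk_u += 1
--     i_a = walk_a
--     assert i_u == walk_u
--     assert i_u <= i_a
--     assert seq_u[i_u] == seq_a[i_a]
--     return (i_a, seq_a[i_a])
-- ===== SOURCE B (Python) =====
-- def aligned_index(seq_a, i_u):
--     positions = [idx for idx, ch in enumerate(seq_a) if ch != "-"]
--     if not (0 <= i_u < len(positions)):
--         raise IndexError("unaligned index out of range")
--     i_a = positions[i_u]
--     return (i_a, seq_a[i_a])
-- ===== Notes on version B (the rewrite author's own statement) =====
-- stated objective: simpler
-- what changed: Replaces the two-pointer while-walk over the aligned and unaligned sequences by a single comprehension collecting aligned positions of non-dash characters, followed by a direct list lookup.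
import Mathlib
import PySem

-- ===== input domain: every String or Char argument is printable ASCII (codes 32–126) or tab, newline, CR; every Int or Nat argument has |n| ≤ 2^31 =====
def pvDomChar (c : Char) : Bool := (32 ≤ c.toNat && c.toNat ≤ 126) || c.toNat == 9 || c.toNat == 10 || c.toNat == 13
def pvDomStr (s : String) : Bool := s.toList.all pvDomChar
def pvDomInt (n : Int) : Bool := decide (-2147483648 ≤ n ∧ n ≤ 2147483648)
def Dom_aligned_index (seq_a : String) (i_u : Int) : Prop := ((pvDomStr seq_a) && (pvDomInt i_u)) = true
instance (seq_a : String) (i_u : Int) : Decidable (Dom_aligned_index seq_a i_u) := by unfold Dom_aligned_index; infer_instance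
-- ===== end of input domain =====

-- B replaces A's two-pointer while-walk by building the list of aligned positions of
-- non-dash characters and indexing it directly (same O(n) cost, plainer code).


-- ===== PORT A =====
-- the while loop; none = IndexError (an out-of-range seq_a[walk_a] / seq_u[i_u] / seq_u[walk_u]).
-- fuel = len(seq_a) + 1 - walk_a: every reachable iteration either increments walk_a or raises;
-- the no-progress branch (unreachable from the initial state) is kept literally and burns fuel.
def alignedGo (sa su : List Char) (i_u : Int) : Nat → Int → Int → Option (Int × String)
  | 0, _, _ => none
  | fuel+1, wa, wu =>
    if wu = i_u then
      match PySem.List.pyGet? sa wa with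
      | none => none
      | some ca =>
        match PySem.List.pyGet? su i_u with
        | none => none
        | some cu =>
          if ca = cu then some (wa, String.ofList [ca])
          else
            if ca = '-' then alignedGo sa su i_u fuel (wa+1) wu
            else
              match PySem.List.pyGet? su wu with
              | none => none
              | some cw =>
                if ca = cw then alignedGo sa su i_u fuel (wa+1) (wu+1)
                else alignedGo sa su i_u fuel wa wu
    else
      match PySem.List.pyGet? sa wa with
      | none => none
      | some ca =>
        if ca = '-' then alignedGo sa su i_u fuel (wa+1) wu
        else
          match PySem.List.pyGet? su wu with
          | none => none
          | some cw =>
            if ca = cw then alignedGo sa su i_u fuel (wa+1) (wu+1)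
            else alignedGo sa su i_u fuel wa wu

def aligned_index (seq_a : String) (i_u : Int) : Int × String :=
  let seq_u := PySem.Str.replace seq_a "-" ""
  match alignedGo seq_a.toList seq_u.toList i_u (seq_a.toList.length + 1) 0 0 with
  | some r => r
  | none => (0, "")   -- Python raises IndexError here; excluded by Pre_

-- ===== PORT B =====
def aligned_index_alt (seq_a : String) (i_u : Int) : Int × String :=
  let positions := ((PySem.List.enumerate seq_a.toList).filter (fun p => p.2 != '-')).map (·.1)
  if 0 ≤ i_u ∧ i_u < (positions.length : Int) then
    match PySem.List.pyGet? positions i_u with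
    | some ia =>
      (ia, match PySem.Str.pyGet? seq_a ia with | some c => String.ofList [c] | none => "")
    | none => (0, "")   -- unreachable (the bounds were just checked)
  else (0, "")   -- Python B raises IndexError here; excluded by Pre_

-- ===== PRECONDITION & SPEC =====
-- exactly the inputs on which Python A returns: 0 ≤ i_u < len(seq_u); elsewhere both A and B raise IndexError
def Pre_aligned_index (seq_a : String) (i_u : Int) : Prop :=
  0 ≤ i_u ∧ i_u < ((seq_a.toList.filter (fun c => c != '-')).length : Int)
instance (seq_a : String) (i_u : Int) : Decidable (Pre_aligned_index seq_a i_u) := by unfold Pre_aligned_index; infer_instance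
def pvWitness_aligned_index : String × Int := ("A-B-C", 1)

def Spec_aligned_index (seq_a : String) (i_u : Int) (out : Int × String) : Prop := out = aligned_index_alt seq_a i_u
instance (seq_a : String) (i_u : Int) (out : Int × String) : Decidable (Spec_aligned_index seq_a i_u out) := by unfold Spec_aligned_index; infer_instance

-- ===== CLAIM (what is proved, stated in full; the proofs are below) =====
def Claim_equal_aligned_index : Prop := ∀ (seq_a : String) (i_u : Int), Dom_aligned_index seq_a i_u → Pre_aligned_index seq_a i_u → Spec_aligned_index seq_a i_u (aligned_index seq_a i_u)

-- ===== LEMMAS AND PROOFS =====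

-- index in l of the k-th non-dash character
def idxNth : List Char → Nat → Nat
  | [], _ => 0
  | c :: t, k =>
    if c ≠ '-' then (if k = 0 then 0 else 1 + idxNth t (k-1))
    else 1 + idxNth t k

-- seq_a.replace("-","") is the dash-filter
theorem replace_go_filter : ∀ (fuel : Nat) (l acc : List Char), l.length ≤ fuel →
    PySem.Chars.replace.go ['-'] [] fuel l acc = acc.reverse ++ l.filter (fun c => c != '-') := by
  intro fuel
  induction fuel with
  | zero =>
    intro l acc h
    have : l = [] := by cases l <;> simp_all
    subst this; simp [PySem.Chars.replace.go]
  | succ f ih =>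
    intro l acc h
    cases l with
    | nil => simp [PySem.Chars.replace.go]
    | cons c t =>
      by_cases hc : c = '-'
      · subst hc
        rw [PySem.Chars.replace.go]
        simp only [List.isPrefixOf, BEq.rfl, Bool.and_true, if_true, List.length_cons,
          List.length_nil, Nat.zero_add, List.drop_succ_cons, List.drop_zero, List.reverse_nil,
          List.nil_append]
        rw [ih _ _ (by simpa using h)]
        simp
      · rw [PySem.Chars.replace.go]
        have hp : (['-'].isPrefixOf (c :: t)) = false := by
          simp [List.isPrefixOf]; exact fun hh => (hc (by simpa using hh.symm)).elim
        rw [hp]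
        simp only [Bool.false_eq_true, if_false]
        rw [ih _ _ (by simpa using h)]
        simp [hc]

theorem replace_dash_filter (s : String) :
    (PySem.Str.replace s "-" "").toList = s.toList.filter (fun c => c != '-') := by
  rw [PySem.Str.toList_replace]
  show PySem.Chars.replace s.toList "-".toList "".toList = _
  rw [PySem.Chars.replace]
  simp only [show ("-".toList) = ['-'] from rfl, show ("".toList) = ([] : List Char) from rfl]
  rw [if_neg (by simp)]
  rw [replace_go_filter _ _ _ le_rfl]
  simp

-- B's positions list: its length and its entries
theorem posF_length : ∀ (l : List Char) (s : Int),
    (((PySem.List.enumerate l s).filter (fun p => p.2 != '-')).map (·.1)).length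
      = (l.filter (fun c => c != '-')).length := by
  intro l
  induction l with
  | nil => intro s; simp [PySem.List.enumerate_nil]
  | cons c t ih =>
    intro s
    by_cases hc : c = '-' <;>
      simp [PySem.List.enumerate_cons, List.filter_cons, hc, ih]

theorem posF_spec : ∀ (l : List Char) (s : Int) (k : Nat), k < (l.filter (fun c => c != '-')).length →
    PySem.List.pyGet? (((PySem.List.enumerate l s).filter (fun p => p.2 != '-')).map (·.1)) (k : Int)
      = some (s + (idxNth l k : Int)) := by
  intro l
  induction l with
  | nil => intro s k hk; simp at hk
  | cons c t ih =>
    intro s k hk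
    by_cases hc : c = '-'
    · subst hc
      simp only [PySem.List.enumerate_cons, List.filter_cons] at *
      rw [show (((s, '-').2 != '-') = false) by simp] at *
      simp only [Bool.false_eq_true, if_false]
      rw [ih (s+1) k (by simpa using hk)]
      simp [idxNth]; ring
    · simp only [PySem.List.enumerate_cons, List.filter_cons]
      rw [show (((s, c).2 != '-') = true) by simpa using hc]
      simp only [if_true, List.map_cons]
      cases k with
      | zero => simp [idxNth, hc, PySem.List.pyGet?_zero_cons]
      | succ k' =>
        rw [show (((k'+1 : Nat) : Int)) = ((k' : Int) + 1) by push_cast; ring]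
        rw [PySem.List.pyGet?_cons_succ]
        have hk' : k' < (t.filter (fun c => c != '-')).length := by
          simp only [List.filter_cons] at hk
          rw [show ((c != '-') = true) by simpa using hc] at hk
          simpa using hk
        rw [ih (s+1) k' hk']
        simp [idxNth, hc]; ring

theorem idxNth_get : ∀ (l : List Char) (k : Nat), k < (l.filter (fun c => c != '-')).length →
    idxNth l k < l.length ∧ l[idxNth l k]? = (l.filter (fun c => c != '-'))[k]? := by
  intro l
  induction l with
  | nil => intro k hk; simp at hk
  | cons c t ih =>
    intro k hk
    by_cases hc : c = '-'
    · subst hc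
      simp only [List.filter_cons] at hk ⊢
      rw [show (('-' != '-') = false) by simp] at hk ⊢
      simp only [Bool.false_eq_true, if_false] at hk ⊢
      obtain ⟨h, he⟩ := ih k hk
      constructor
      · simp [idxNth]; omega
      · simp only [idxNth, ne_eq, not_true_eq_false, if_false, Nat.add_comm 1, List.getElem?_cons_succ]
        exact he
    · simp only [List.filter_cons] at hk ⊢
      rw [show ((c != '-') = true) by simpa using hc] at hk ⊢
      simp only [if_true] at hk ⊢
      cases k with
      | zero => constructor
                · simp [idxNth, hc]
                · simp [idxNth, hc]
      | succ k' =>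
        obtain ⟨h, he⟩ := ih k' (by simpa using hk)
        constructor
        · simp [idxNth, hc]; omega
        · simp only [idxNth, ne_eq, hc, not_false_iff, if_true, if_neg (Nat.succ_ne_zero k'),
            Nat.add_sub_cancel, Nat.add_comm 1, List.getElem?_cons_succ]
          exact he

-- the loop returns the aligned position of the i_u-th non-dash character
theorem alignedGo_spec : ∀ (t pre : List Char) (i_u : Int),
    ((pre.filter (fun c => c != '-')).length : Int) ≤ i_u →
    i_u < (((pre ++ t).filter (fun c => c != '-')).length : Int) →
    alignedGo (pre ++ t) ((pre ++ t).filter (fun c => c != '-')) i_u (t.length + 1)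
        (pre.length : Int) ((pre.filter (fun c => c != '-')).length : Int)
      = some ((pre.length : Int) + (idxNth t (i_u.toNat - (pre.filter (fun c => c != '-')).length) : Int),
              String.ofList [(t.filter (fun c => c != '-')).getD (i_u.toNat - (pre.filter (fun c => c != '-')).length) 'x']) := by
  intro t
  induction t with
  | nil =>
    intro pre i_u hle hlt
    simp only [List.append_nil] at hlt
    omega
  | cons c t' ih =>
    intro pre i_u hle hlt
    have h0 : (0:Int) ≤ i_u := le_trans (by positivity) hle
    have hsa : PySem.List.pyGet? (pre ++ c :: t') (pre.length : Int) = some c :=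
      PySem.List.pyGet?_append_length pre t' c
    rw [show (c :: t').length + 1 = (t'.length + 1) + 1 from rfl, alignedGo]
    by_cases hc : c = '-'
    · -- dash column: both branches recurse with walk_a+1
      subst hc
      have hfil2 : List.filter (fun c => c != '-') (pre ++ '-' :: t')
          = List.filter (fun c => c != '-') pre ++ List.filter (fun c => c != '-') t' := by
        simp
      have hrec := ih (pre ++ ['-']) i_u (by simpa using hle)
        (by rw [List.append_assoc]; simpa using hlt)
      rw [List.append_assoc] at hrec
      simp only [List.singleton_append] at hrec
      rw [show List.filter (fun c => c != '-') (pre ++ ['-']) = List.filter (fun c => c != '-') pre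
            by simp] at hrec
      simp only [List.length_append, List.length_cons, List.length_nil] at hrec
      push_cast at hrec
      by_cases hw : ((List.filter (fun c => c != '-') pre).length : Int) = i_u
      · have hsu : PySem.List.pyGet? (List.filter (fun c => c != '-') (pre ++ '-' :: t')) i_u
            = some ((List.filter (fun c => c != '-') (pre ++ '-' :: t'))[i_u.toNat]) :=
          PySem.List.pyGet?_eq_some_getElem _ h0 hlt
        have hmem : ((List.filter (fun c => c != '-') (pre ++ '-' :: t'))[i_u.toNat]'(by omega))
            ∈ List.filter (fun c => c != '-') (pre ++ '-' :: t') := List.getElem_mem _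
        have hne : ('-' : Char) ≠ ((List.filter (fun c => c != '-') (pre ++ '-' :: t'))[i_u.toNat]'(by omega)) := by
          have := List.of_mem_filter hmem
          simp only [bne_iff_ne, ne_eq] at this
          exact fun h => this h.symm
        rw [if_pos hw]
        simp only [hsa, hsu, if_neg hne, if_pos rfl]
        rw [hrec]
        simp only [if_true, Option.some.injEq, Prod.mk.injEq, idxNth, ne_eq, not_true_eq_false,
          if_false]
        refine ⟨by push_cast; ring, by simp⟩
      · rw [if_neg hw]
        simp only [hsa, if_pos rfl]
        rw [hrec]
        simp only [if_true, Option.some.injEq, Prod.mk.injEq, idxNth, ne_eq, not_true_eq_false,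
          if_false]
        refine ⟨by push_cast; ring, by simp⟩
    · -- non-dash column
      have hsuf : List.filter (fun c => c != '-') (pre ++ c :: t')
          = List.filter (fun c => c != '-') pre ++ c :: List.filter (fun c => c != '-') t' := by
        simp [hc]
      have hsuw : PySem.List.pyGet? (List.filter (fun c => c != '-') (pre ++ c :: t'))
          (((List.filter (fun c => c != '-') pre).length : Int)) = some c := by
        rw [hsuf]; exact PySem.List.pyGet?_append_length _ _ _
      by_cases hw : ((List.filter (fun c => c != '-') pre).length : Int) = i_u
      · -- exit
        have hsu : PySem.List.pyGet? (List.filter (fun c => c != '-') (pre ++ c :: t')) i_u = some c := by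
          rw [← hw]; exact hsuw
        rw [if_pos hw]
        simp only [hsa, hsu, if_pos rfl]
        have hk : i_u.toNat - (List.filter (fun c => c != '-') pre).length = 0 := by omega
        rw [hk]
        simp only [Option.some.injEq, Prod.mk.injEq, idxNth, ne_eq, hc, not_false_iff, if_true,
          if_pos rfl, List.filter_cons]
        rw [show ((c != '-') = true) by simpa using hc]
        simp
      · -- match-and-advance
        have hrec := ih (pre ++ [c]) i_u
          (by simp only [List.filter_append, List.filter_cons, List.filter_nil]
              simp only [show ((c != '-') = true) by simpa using hc, if_true,
                List.length_append, List.length_cons, List.length_nil]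
              push_cast; omega)
          (by rw [List.append_assoc]; simpa using hlt)
        rw [List.append_assoc] at hrec
        simp only [List.singleton_append] at hrec
        rw [show List.filter (fun c => c != '-') (pre ++ [c])
              = List.filter (fun c => c != '-') pre ++ [c] by simp [hc]] at hrec
        simp only [List.length_append, List.length_cons, List.length_nil] at hrec
        push_cast at hrec
        rw [if_neg hw]
        simp only [hsa, if_neg hc, hsuw, if_pos rfl]
        rw [hrec]
        have hk1 : i_u.toNat - (List.filter (fun c => c != '-') pre).length
            = (i_u.toNat - ((List.filter (fun c => c != '-') pre).length + 1)) + 1 := by omega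
        rw [hk1]
        simp only [if_true, Option.some.injEq, Prod.mk.injEq, idxNth, ne_eq, hc, not_false_iff,
          Nat.succ_ne_zero, if_neg, Nat.add_sub_cancel, List.filter_cons,
          show ((c != '-') = true) by simpa using hc, List.getD_cons_succ]
        refine ⟨by push_cast; ring, by simp⟩

-- ===== VERDICT (by name: the statement is the Claim_ definition above) =====
theorem aligned_index_spec : Claim_equal_aligned_index := by
  intro seq_a i_u _ hpre
  obtain ⟨h0, hlt⟩ := hpre
  unfold Spec_aligned_index aligned_index aligned_index_alt
  simp only [letFun]
  have hk : i_u = ((i_u.toNat : Nat) : Int) := by omega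
  have hkl : i_u.toNat < (seq_a.toList.filter (fun c => c != '-')).length := by omega
  have hmain := alignedGo_spec seq_a.toList [] i_u (by simpa using h0) (by simpa using hlt)
  simp only [List.nil_append, List.filter_nil, List.length_nil, Nat.cast_zero, Nat.sub_zero,
    Int.toNat_zero] at hmain
  have hA : alignedGo seq_a.toList (PySem.Str.replace seq_a "-" "").toList i_u
      (seq_a.toList.length + 1) 0 0
      = some ((idxNth seq_a.toList i_u.toNat : Int),
              String.ofList [(seq_a.toList.filter (fun c => c != '-')).getD i_u.toNat 'x']) := by
    rw [replace_dash_filter]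
    simpa using hmain
  rw [hA]
  have hcond : (0 ≤ i_u ∧ i_u <
      (((((PySem.List.enumerate seq_a.toList).filter (fun p => p.2 != '-')).map (·.1)).length : Nat) : Int)) := by
    rw [posF_length]
    exact ⟨h0, hlt⟩
  rw [if_pos hcond]
  have hget : PySem.List.pyGet?
      (((PySem.List.enumerate seq_a.toList).filter (fun p => p.2 != '-')).map (·.1)) i_u
      = some ((0 : Int) + (idxNth seq_a.toList i_u.toNat : Int)) := by
    rw [hk]; exact posF_spec seq_a.toList 0 i_u.toNat hkl
  rw [hget]
  obtain ⟨hb, he⟩ := idxNth_get seq_a.toList i_u.toNat hkl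
  have hs : PySem.Str.pyGet? seq_a ((0 : Int) + (idxNth seq_a.toList i_u.toNat : Int))
      = some ((seq_a.toList.filter (fun c => c != '-'))[i_u.toNat]'hkl) := by
    rw [zero_add, PySem.Str.pyGet?_natCast, he, List.getElem?_eq_getElem hkl]
  simp only [hs, Prod.mk.injEq]
  refine ⟨by omega, ?_⟩
  rw [List.getD_eq_getElem _ _ hkl]
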